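-- pv_equiv track=rewrite | github.com/ImChong/Robotics_Notebooks | scripts/search_wiki_core.py | _find_matched_lines
-- ===== SOURCE A (Python) =====
-- def _find_matched_lines(
--     lines: list[str], query_words: list[str], context_lines: int
-- ) -> list[tuple[int, list[str], int]]:
--     matched_lines: list[tuple[int, list[str], int]] = []
--     if not query_words:
--         return matched_lines
--     lowered_words = [word.lower() for word in query_words if word.strip()]
--     if not lowered_words:
--         return matched_lines
--
--     for i, line in enumerate(lines):
--         line_lower = line.lower()
--         found = False
--         for word in lowered_words:
--             if word in line_lower:
--                 found = True
--                 break
--         if found: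
--             start = max(0, i - context_lines)
--             end = min(len(lines), i + context_lines + 1)
--             matched_lines.append((i + 1, lines[start:end], i - start))
--     return matched_lines
-- ===== SOURCE B (Python) =====
-- def _find_matched_lines(
--     lines: list[str], query_words: list[str], context_lines: int
-- ) -> list[tuple[int, list[str], int]]:
--     lowered_words = [word.lower() for word in query_words if word.strip()]
--     if not lowered_words:
--         return []
--     lowered_lines = [line.lower() for line in lines]
--     hit = set()
--     for word in lowered_words:
--         for i, line_lower in enumerate(lowered_lines):
--             if word in line_lower:
--                 hit.add(i)
--     n = len(lines)
--     result = []
--     for i in sorted(hit):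
--         start = max(0, i - context_lines)
--         end = min(n, i + context_lines + 1)
--         result.append((i + 1, lines[start:end], i - start))
--     return result
-- ===== Notes on version B (the rewrite author's own statement) =====
-- stated objective: alternative
-- what changed: Inverted the loop nesting: instead of scanning the word list inside a per-line loop with a break, B lowers all lines once, makes one pass per word over the lowered lines collecting matched indices into a set, then builds the context tuples in a single pass over the sorted indices.
import Mathlib
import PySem

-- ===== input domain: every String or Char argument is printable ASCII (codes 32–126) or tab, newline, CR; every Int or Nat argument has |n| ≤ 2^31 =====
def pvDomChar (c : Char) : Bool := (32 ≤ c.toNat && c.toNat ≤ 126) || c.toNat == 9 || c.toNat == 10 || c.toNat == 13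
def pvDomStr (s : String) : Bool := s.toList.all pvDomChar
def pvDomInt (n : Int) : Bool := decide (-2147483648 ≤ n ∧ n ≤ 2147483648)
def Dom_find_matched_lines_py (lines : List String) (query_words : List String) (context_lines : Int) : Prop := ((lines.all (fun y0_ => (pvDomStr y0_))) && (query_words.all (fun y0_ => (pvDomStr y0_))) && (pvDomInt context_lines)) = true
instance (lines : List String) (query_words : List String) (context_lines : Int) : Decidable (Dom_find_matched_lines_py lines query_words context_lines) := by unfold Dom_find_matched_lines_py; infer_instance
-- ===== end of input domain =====

-- B inverts A's loop nesting: one pass per query word over the pre-lowered lines collecting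
-- matched indices into a set, then the context tuples are built from the sorted indices
-- (objective: alternative structure, same cost).

-- ===== PORT A =====
-- the inner 'for word in lowered_words: … break' loop of A
def pvFoundLoop : List String → String → Bool
  | [], _ => false
  | w :: ws, ll => if PySem.Str.isIn w ll then true else pvFoundLoop ws ll

def find_matched_lines_py (lines : List String) (query_words : List String) (context_lines : Int) : List (Int × List String × Int) :=
  if query_words = [] then [] else
  let lowered_words := (query_words.filter (fun w => PySem.Str.len (PySem.Str.strip w) != 0)).map PySem.Str.lower
  if lowered_words = [] then [] else
  (PySem.List.enumerate lines 0).foldl (fun matched_lines p =>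
      let line_lower := PySem.Str.lower p.2
      let found := pvFoundLoop lowered_words line_lower
      if found then
        let start := max 0 (p.1 - context_lines)
        let stop := min (lines.length : Int) (p.1 + context_lines + 1)
        matched_lines ++ [(p.1 + 1, PySem.List.slice lines (some start) (some stop), p.1 - start)]
      else matched_lines)
    []

-- ===== PORT B =====
def find_matched_lines_py_alt (lines : List String) (query_words : List String) (context_lines : Int) : List (Int × List String × Int) :=
  let lowered_words := (query_words.filter (fun w => PySem.Str.len (PySem.Str.strip w) != 0)).map PySem.Str.lower
  if lowered_words = [] then [] else
  let lowered_lines := lines.map PySem.Str.lower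
  let hit : PySem.Set Int := lowered_words.foldl (fun hit word =>
      (PySem.List.enumerate lowered_lines 0).foldl
        (fun hit p => if PySem.Str.isIn word p.2 then PySem.Set.add hit p.1 else hit) hit)
    PySem.Set.empty
  let n : Int := lines.length
  (PySem.List.sorted hit (fun x => x) false).foldl (fun result i =>
      let start := max 0 (i - context_lines)
      let stop := min n (i + context_lines + 1)
      result ++ [(i + 1, PySem.List.slice lines (some start) (some stop), i - start)])
    []

-- ===== PRECONDITION & SPEC =====
def Spec_find_matched_lines_py (lines : List String) (query_words : List String) (context_lines : Int) (out : List (Int × List String × Int)) : Prop := out = find_matched_lines_py_alt lines query_words context_lines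
instance (lines : List String) (query_words : List String) (context_lines : Int) (out : List (Int × List String × Int)) : Decidable (Spec_find_matched_lines_py lines query_words context_lines out) := by unfold Spec_find_matched_lines_py; infer_instance

-- ===== CLAIM (what is proved, stated in full; the proofs are below) =====
def Claim_equal_find_matched_lines_py : Prop := ∀ (lines : List String) (query_words : List String) (context_lines : Int), Dom_find_matched_lines_py lines query_words context_lines → Spec_find_matched_lines_py lines query_words context_lines (find_matched_lines_py lines query_words context_lines)

-- ===== LEMMAS AND PROOFS =====

theorem pvFoundLoop_iff (ws : List String) (ll : String) :
    pvFoundLoop ws ll = ws.any (fun w => PySem.Str.isIn w ll) := by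
  induction ws with
  | nil => rfl
  | cons w ws ih =>
    simp only [pvFoundLoop, List.any_cons, ih]
    cases PySem.Str.isIn w ll <;> simp


theorem pvInner_eq (ll : List (Int × String)) (w : String) (s : PySem.Set Int) :
    ll.foldl (fun s p => if PySem.Str.isIn w p.2 then PySem.Set.add s p.1 else s) s
      = PySem.Set.update s ((ll.filter (fun p => PySem.Str.isIn w p.2)).map (·.1)) := by
  rw [PySem.Set.update_map_eq_foldl_add, List.foldl_filter]

theorem pvUpdateFold_mem {α : Type} (lw : List α) (L : α → List Int) (s : PySem.Set Int) (x : Int) :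
    x ∈ lw.foldl (fun s w => PySem.Set.update s (L w)) s ↔ x ∈ s ∨ ∃ w ∈ lw, x ∈ L w := by
  induction lw generalizing s with
  | nil => simp
  | cons w ws ih => simp [List.foldl_cons, ih, PySem.Set.mem_update]; tauto

theorem pvUpdateFold_nodup {α : Type} (lw : List α) (L : α → List Int) (s : PySem.Set Int) (h : s.Nodup) :
    (lw.foldl (fun s w => PySem.Set.update s (L w)) s).Nodup := by
  induction lw generalizing s with
  | nil => exact h
  | cons w ws ih =>
    simp only [List.foldl_cons]
    exact ih _ (PySem.Set.nodup_update _ _ h)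

-- the set of matched indices, sorted, is exactly A's filtered index list
theorem pvSorted_hit (lines lw : List String) :
    PySem.List.sorted
      (lw.foldl (fun hit word =>
          (PySem.List.enumerate (lines.map PySem.Str.lower) 0).foldl
            (fun hit p => if PySem.Str.isIn word p.2 then PySem.Set.add hit p.1 else hit) hit)
        PySem.Set.empty) (fun x => x) false
      = ((PySem.List.enumerate lines 0).filter (fun p => pvFoundLoop lw (PySem.Str.lower p.2))).map (·.1) := by
  simp only [pvInner_eq]
  have hhitmem : ∀ x : Int,
      x ∈ lw.foldl (fun s w => PySem.Set.update s
          (((PySem.List.enumerate (lines.map PySem.Str.lower) 0).filter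
            (fun p => PySem.Str.isIn w p.2)).map (·.1))) PySem.Set.empty
        ↔ ∃ w ∈ lw, ∃ p ∈ PySem.List.enumerate (lines.map PySem.Str.lower) 0,
            PySem.Str.isIn w p.2 ∧ x = p.1 := by
    intro x
    rw [pvUpdateFold_mem]
    simp [PySem.Set.empty, List.mem_filter, PySem.List.mem_enumerate_iff]
    tauto
  have hTmem : ∀ x : Int,
      x ∈ ((PySem.List.enumerate lines 0).filter
            (fun p => pvFoundLoop lw (PySem.Str.lower p.2))).map (·.1)
        ↔ ∃ p ∈ PySem.List.enumerate lines 0,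
            pvFoundLoop lw (PySem.Str.lower p.2) ∧ x = p.1 := by
    intro x; simp [List.mem_filter]
  have hTpw : (((PySem.List.enumerate lines 0).filter
        (fun p => pvFoundLoop lw (PySem.Str.lower p.2))).map (·.1)).Pairwise (· < ·) := by
    rw [List.pairwise_map]
    exact (PySem.List.pairwise_lt_enumerate lines 0).filter _
  have hTnd : (((PySem.List.enumerate lines 0).filter
        (fun p => pvFoundLoop lw (PySem.Str.lower p.2))).map (·.1)).Nodup :=
    hTpw.imp (fun h => ne_of_lt h)
  have hHnd : (lw.foldl (fun s w => PySem.Set.update s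
          (((PySem.List.enumerate (lines.map PySem.Str.lower) 0).filter
            (fun p => PySem.Str.isIn w p.2)).map (·.1))) PySem.Set.empty).Nodup :=
    pvUpdateFold_nodup _ _ _ List.nodup_nil
  apply PySem.List.sorted_eq_of_perm_of_pairwise_lt
  · refine (List.perm_ext_iff_of_nodup hTnd hHnd).mpr ?_
    intro x
    rw [hTmem, hhitmem]
    constructor
    · rintro ⟨p, hp, hf, hx⟩
      rw [PySem.List.mem_enumerate_iff] at hp
      obtain ⟨k, hk, rfl⟩ := hp
      rw [pvFoundLoop_iff, List.any_eq_true] at hf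
      obtain ⟨w, hw, hin⟩ := hf
      exact ⟨w, hw, ((0 : Int) + k, (lines.map PySem.Str.lower)[k]'(by simpa using hk)),
        by rw [PySem.List.mem_enumerate_iff]; exact ⟨k, by simpa using hk, rfl⟩,
        by simpa using hin, hx⟩
    · rintro ⟨w, hw, p, hp, hin, hx⟩
      rw [PySem.List.mem_enumerate_iff] at hp
      obtain ⟨k, hk, rfl⟩ := hp
      refine ⟨((0 : Int) + k, lines[k]'(by simpa using hk)),
        by rw [PySem.List.mem_enumerate_iff]; exact ⟨k, by simpa using hk, rfl⟩, ?_, hx⟩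
      rw [pvFoundLoop_iff, List.any_eq_true]
      exact ⟨w, hw, by simpa using hin⟩
  · exact hTpw

-- ===== VERDICT (by name: the statement is the Claim_ definition above) =====
theorem find_matched_lines_py_spec : Claim_equal_find_matched_lines_py := by
  intro lines qws c _
  show find_matched_lines_py lines qws c = find_matched_lines_py_alt lines qws c
  by_cases hq : qws = []
  · subst hq; simp [find_matched_lines_py, find_matched_lines_py_alt]
  · by_cases hlw : (qws.filter (fun w => PySem.Str.len (PySem.Str.strip w) != 0)).map PySem.Str.lower = []
    · simp only [find_matched_lines_py, find_matched_lines_py_alt]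
      rw [if_neg hq, if_pos hlw, if_pos hlw]
    · simp only [find_matched_lines_py, find_matched_lines_py_alt, hq, hlw, if_false]
      rw [PySem.List.foldl_append_if, PySem.List.foldl_append_singleton_eq_map]
      rw [pvSorted_hit, List.map_map]
      simp
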